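-- pv_equiv track=rewrite | github.com/jhigh1594/pm-os-template | workspace-skeleton/🔧 Automation/scripts/memory_updater.py | generate_session_summary
-- ===== SOURCE A (Python) =====
-- def generate_session_summary(intent: str, commits: list) -> str:
--     """Generate a session summary combining intent with actual commits.
--
--     This is where the magic happens - we combine planned work (intent)
--     with actual work (commits) to create meaningful session summaries.
--     """
--     if not commits:
--         return f"No commits made. Session may have been planning, research, or discussion."
--
--     # Extract themes from commits
--     themes = set()
--     for commit in commits:
--         msg_lower = commit["message"].lower()
--         if any(kw in msg_lower for kw in ["fix", "bug", "resolve"]):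
--             themes.add("bug fixes")
--         if any(kw in msg_lower for kw in ["feat", "add", "implement", "create"]):
--             themes.add("feature development")
--         if any(kw in msg_lower for kw in ["doc", "readme", "update"]):
--             themes.add("documentation")
--         if any(kw in msg_lower for kw in ["refactor", "clean", "simplify"]):
--             themes.add("code improvement")
--         if any(kw in msg_lower for kw in ["test", "spec"]):
--             themes.add("testing")
--
--     # Build summary
--     parts = []
--
--     if intent:
--         parts.append(f"Planned: {intent}")
--
--     if themes:
--         parts.append(f"Completed: {', '.join(sorted(themes))}")
--
--     if len(commits) > 0:
--         # Summarize commits (show patterns, not just raw messages)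
--         commit_summary = summarize_commits(commits)
--         parts.append(f"Outcome: {commit_summary}")
--
--     return " | ".join(parts) if parts else "Session activity recorded."
--
-- def summarize_commits(commits: list) -> str:
--     """Create a concise summary of commit activity."""
--     if not commits:
--         return "no code changes"
--
--     # Group related commits
--     messages = [c["message"] for c in commits]
--
--     # Count patterns
--     patterns = {
--         "memory": sum(1 for m in messages if "memory" in m.lower()),
--         "session": sum(1 for m in messages if "session" in m.lower()),
--         "doc": sum(1 for m in messages if any(kw in m.lower() for kw in ["doc", "readme", "update"])),
--         "fix": sum(1 for m in messages if any(kw in m.lower() for kw in ["fix", "bug"])),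
--     }
--
--     # Build summary
--     summary_parts = []
--     for pattern, count in patterns.items():
--         if count > 0:
--             summary_parts.append(f"{count} {pattern}")
--
--     if summary_parts:
--         return ", ".join(summary_parts)
--     elif len(commits) == 1:
--         return f"{commits[0]['message'][:40]}..."
--     else:
--         return f"{len(commits)} commit(s)"
-- ===== SOURCE B (Python) =====
-- THEME_TABLE = [
--     (("fix", "bug", "resolve"), "bug fixes"),
--     (("feat", "add", "implement", "create"), "feature development"),
--     (("doc", "readme", "update"), "documentation"),
--     (("refactor", "clean", "simplify"), "code improvement"),
--     (("test", "spec"), "testing"),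
-- ]
--
--
-- def generate_session_summary(intent: str, commits: list) -> str:
--     if not commits:
--         return "No commits made. Session may have been planning, research, or discussion."
--
--     # One pass: lower-case each message once, update themes and all four counts.
--     themes = set()
--     n_mem = n_sess = n_doc = n_fix = 0
--     for commit in commits:
--         m = commit["message"].lower()
--         for kws, theme in THEME_TABLE:
--             if any(k in m for k in kws):
--                 themes.add(theme)
--         if "memory" in m:
--             n_mem += 1
--         if "session" in m:
--             n_sess += 1
--         if "doc" in m or "readme" in m or "update" in m:
--             n_doc += 1
--         if "fix" in m or "bug" in m:
--             n_fix += 1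
--
--     parts = []
--     if intent:
--         parts.append(f"Planned: {intent}")
--     if themes:
--         parts.append("Completed: " + ", ".join(sorted(themes)))
--
--     items = [f"{n} {name}"
--              for n, name in ((n_mem, "memory"), (n_sess, "session"),
--                              (n_doc, "doc"), (n_fix, "fix")) if n > 0]
--     if items:
--         outcome = ", ".join(items)
--     elif len(commits) == 1:
--         outcome = f"{commits[0]['message'][:40]}..."
--     else:
--         outcome = f"{len(commits)} commit(s)"
--     parts.append("Outcome: " + outcome)
--
--     return " | ".join(parts)
-- ===== Notes on version B (the rewrite author's own statement) =====
-- stated objective: alternative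
-- what changed: One fused pass over the commits lower-cases each message once and updates the themes set and all four pattern counters together (driven by a keyword table), replacing A's nine separate scans (five theme checks per loop plus four whole-list counting passes in summarize_commits); the outcome string is then assembled from the precomputed counts. Pre_ excludes only commits lacking a 'message' key, on which A raises KeyError.
import Mathlib
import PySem

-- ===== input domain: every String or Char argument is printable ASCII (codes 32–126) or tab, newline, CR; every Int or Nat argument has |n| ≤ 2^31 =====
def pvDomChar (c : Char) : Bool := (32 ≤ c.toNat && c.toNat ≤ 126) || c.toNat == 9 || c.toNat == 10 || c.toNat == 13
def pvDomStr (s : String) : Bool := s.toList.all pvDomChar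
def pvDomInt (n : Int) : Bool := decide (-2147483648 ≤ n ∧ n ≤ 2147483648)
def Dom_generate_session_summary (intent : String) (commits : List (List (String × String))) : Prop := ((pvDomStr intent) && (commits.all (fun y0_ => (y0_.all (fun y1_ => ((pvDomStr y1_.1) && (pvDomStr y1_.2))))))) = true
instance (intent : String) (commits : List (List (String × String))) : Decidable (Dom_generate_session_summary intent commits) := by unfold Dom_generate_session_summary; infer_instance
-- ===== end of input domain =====

-- B fuses A's nine scans of the commit list into one pass (each message lowered once,
-- themes and the four pattern counters updated together); proved equal on Pre_.

-- ===== PORT A =====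

-- commit["message"], shared accessor (under Pre_ the key is present, so the default is never used)
def pvMsgA (commit : List (String × String)) : String :=
  ((PySem.Dict.mk commit).get? "message").getD ""

-- the body of A's theme loop, named so the proofs can speak about it
def pvThemeStepA (th : PySem.Set String) (commit : List (String × String)) : PySem.Set String :=
  let msg_lower := PySem.Str.lower (pvMsgA commit)
  let th := if ["fix","bug","resolve"].any (fun kw => PySem.Str.isIn kw msg_lower) then PySem.Set.add th "bug fixes" else th
  let th := if ["feat","add","implement","create"].any (fun kw => PySem.Str.isIn kw msg_lower) then PySem.Set.add th "feature development" else th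
  let th := if ["doc","readme","update"].any (fun kw => PySem.Str.isIn kw msg_lower) then PySem.Set.add th "documentation" else th
  let th := if ["refactor","clean","simplify"].any (fun kw => PySem.Str.isIn kw msg_lower) then PySem.Set.add th "code improvement" else th
  if ["test","spec"].any (fun kw => PySem.Str.isIn kw msg_lower) then PySem.Set.add th "testing" else th

def summarize_commits (commits : List (List (String × String))) : String :=
  if commits = [] then "no code changes"
  else
    let messages := commits.map pvMsgA
    -- dict literal with four distinct keys, as in the Python source
    let patterns : PySem.Dict String Int := PySem.Dict.mk
      [("memory", (messages.map (fun m => if PySem.Str.isIn "memory" (PySem.Str.lower m) then (1:Int) else 0)).sum),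
       ("session", (messages.map (fun m => if PySem.Str.isIn "session" (PySem.Str.lower m) then (1:Int) else 0)).sum),
       ("doc", (messages.map (fun m => if ["doc","readme","update"].any (fun kw => PySem.Str.isIn kw (PySem.Str.lower m)) then (1:Int) else 0)).sum),
       ("fix", (messages.map (fun m => if ["fix","bug"].any (fun kw => PySem.Str.isIn kw (PySem.Str.lower m)) then (1:Int) else 0)).sum)]
    let summary_parts : List String := patterns.items.foldl
      (fun acc pc => if pc.2 > 0 then acc ++ [PySem.Int.toStr pc.2 ++ " " ++ pc.1] else acc) []
    if summary_parts ≠ [] then PySem.Str.join ", " summary_parts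
    else if commits.length = 1 then
      PySem.Str.slice (pvMsgA (PySem.List.pyGetD commits 0 [])) none (some 40) ++ "..."
    else PySem.Int.toStr (commits.length : Int) ++ " commit(s)"

def generate_session_summary (intent : String) (commits : List (List (String × String))) : String :=
  if commits = [] then "No commits made. Session may have been planning, research, or discussion."
  else
    let themes : PySem.Set String := commits.foldl pvThemeStepA PySem.Set.empty
    let parts : List String := []
    let parts := if intent ≠ "" then parts ++ ["Planned: " ++ intent] else parts
    let parts := if themes ≠ [] then
        parts ++ ["Completed: " ++ PySem.Str.join ", " (PySem.List.sorted themes (fun x => x) false)]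
      else parts
    let parts := if commits.length > 0 then parts ++ ["Outcome: " ++ summarize_commits commits] else parts
    if parts ≠ [] then PySem.Str.join " | " parts else "Session activity recorded."

-- ===== PORT B =====

def pvThemeTable : List (List String × String) :=
  [(["fix","bug","resolve"], "bug fixes"),
   (["feat","add","implement","create"], "feature development"),
   (["doc","readme","update"], "documentation"),
   (["refactor","clean","simplify"], "code improvement"),
   (["test","spec"], "testing")]

-- the body of B's single fused loop
def pvStepB (st : PySem.Set String × Int × Int × Int × Int) (commit : List (String × String)) :
    PySem.Set String × Int × Int × Int × Int :=
  let m := PySem.Str.lower (pvMsgA commit)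
  (pvThemeTable.foldl (fun th p => if p.1.any (fun k => PySem.Str.isIn k m) then PySem.Set.add th p.2 else th) st.1,
   st.2.1 + (if PySem.Str.isIn "memory" m then 1 else 0),
   st.2.2.1 + (if PySem.Str.isIn "session" m then 1 else 0),
   st.2.2.2.1 + (if PySem.Str.isIn "doc" m || PySem.Str.isIn "readme" m || PySem.Str.isIn "update" m then 1 else 0),
   st.2.2.2.2 + (if PySem.Str.isIn "fix" m || PySem.Str.isIn "bug" m then 1 else 0))

def pvScan (commits : List (List (String × String))) : PySem.Set String × Int × Int × Int × Int :=
  commits.foldl pvStepB (PySem.Set.empty, 0, 0, 0, 0)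

def generate_session_summary_alt (intent : String) (commits : List (List (String × String))) : String :=
  match commits with
  | [] => "No commits made. Session may have been planning, research, or discussion."
  | c0 :: _ =>
    let st := pvScan commits
    let themes := st.1
    let counts : List (Int × String) :=
      [(st.2.1, "memory"), (st.2.2.1, "session"), (st.2.2.2.1, "doc"), (st.2.2.2.2, "fix")]
    let parts1 := if intent ≠ "" then ["Planned: " ++ intent] else []
    let parts2 := if themes ≠ [] then
        ["Completed: " ++ PySem.Str.join ", " (PySem.List.sorted themes (fun x => x) false)]
      else []
    let items := (counts.filter (fun p => p.1 > 0)).map (fun p => PySem.Int.toStr p.1 ++ " " ++ p.2)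
    let outcome := if items ≠ [] then PySem.Str.join ", " items
      else if commits.length = 1 then PySem.Str.slice (pvMsgA c0) none (some 40) ++ "..."
      else PySem.Int.toStr (commits.length : Int) ++ " commit(s)"
    PySem.Str.join " | " (parts1 ++ parts2 ++ ["Outcome: " ++ outcome])

-- ===== PRECONDITION & SPEC =====
-- Pre_ excludes exactly the commit dicts with no "message" key, on which A raises KeyError.
def Pre_generate_session_summary (intent : String) (commits : List (List (String × String))) : Prop :=
  ∀ commit ∈ commits, ((PySem.Dict.mk commit).get? "message").isSome = true
instance (intent : String) (commits : List (List (String × String))) : Decidable (Pre_generate_session_summary intent commits) := by unfold Pre_generate_session_summary; infer_instance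

def pvWitness_generate_session_summary : String × (List (List (String × String))) :=
  ("plan work", [[("message", "Fix bug in memory doc")], [("message", "add tests")]])

def Spec_generate_session_summary (intent : String) (commits : List (List (String × String))) (out : String) : Prop := out = generate_session_summary_alt intent commits
instance (intent : String) (commits : List (List (String × String))) (out : String) : Decidable (Spec_generate_session_summary intent commits out) := by unfold Spec_generate_session_summary; infer_instance

-- ===== CLAIM (what is proved, stated in full; the proofs are below) =====
def Claim_equal_generate_session_summary : Prop := ∀ (intent : String) (commits : List (List (String × String))), Dom_generate_session_summary intent commits → Pre_generate_session_summary intent commits → Spec_generate_session_summary intent commits (generate_session_summary intent commits)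

-- ===== LEMMAS AND PROOFS =====

-- A's four per-message counts, named for the proofs
def pvCntMem (c : List (String × String)) : Int :=
  if PySem.Str.isIn "memory" (PySem.Str.lower (pvMsgA c)) then 1 else 0
def pvCntSess (c : List (String × String)) : Int :=
  if PySem.Str.isIn "session" (PySem.Str.lower (pvMsgA c)) then 1 else 0
def pvCntDoc (c : List (String × String)) : Int :=
  if ["doc","readme","update"].any (fun kw => PySem.Str.isIn kw (PySem.Str.lower (pvMsgA c))) then 1 else 0
def pvCntFix (c : List (String × String)) : Int :=
  if ["fix","bug"].any (fun kw => PySem.Str.isIn kw (PySem.Str.lower (pvMsgA c))) then 1 else 0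

theorem pv_step_eq (st : PySem.Set String × Int × Int × Int × Int) (c : List (String × String)) :
    pvStepB st c = (pvThemeStepA st.1 c, st.2.1 + pvCntMem c, st.2.2.1 + pvCntSess c,
                    st.2.2.2.1 + pvCntDoc c, st.2.2.2.2 + pvCntFix c) := by
  unfold pvStepB pvThemeStepA pvCntMem pvCntSess pvCntDoc pvCntFix pvThemeTable
  generalize PySem.Str.lower (pvMsgA c) = m
  simp only [List.foldl_cons, List.foldl_nil, List.any_cons, List.any_nil, Bool.or_false,
    Bool.or_assoc]

theorem pv_scan_fold (commits : List (List (String × String)))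
    (th : PySem.Set String) (a b c d : Int) :
    commits.foldl pvStepB (th, a, b, c, d) =
      (commits.foldl pvThemeStepA th,
       a + (commits.map pvCntMem).sum, b + (commits.map pvCntSess).sum,
       c + (commits.map pvCntDoc).sum, d + (commits.map pvCntFix).sum) := by
  induction commits generalizing th a b c d with
  | nil => simp
  | cons hd tl ih =>
    rw [List.foldl_cons, pv_step_eq, ih]
    simp only [List.foldl_cons, List.map_cons, List.sum_cons]
    refine Prod.ext rfl (Prod.ext ?_ (Prod.ext ?_ (Prod.ext ?_ ?_))) <;> simp <;> ring

theorem pv_parts_eq (n1 n2 n3 n4 : Int) :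
    ([("memory", n1), ("session", n2), ("doc", n3), ("fix", n4)] : List (String × Int)).foldl
      (fun acc pc => if pc.2 > 0 then acc ++ [PySem.Int.toStr pc.2 ++ " " ++ pc.1] else acc) []
    = (([(n1, "memory"), (n2, "session"), (n3, "doc"), (n4, "fix")] : List (Int × String)).filter
        (fun p => p.1 > 0)).map (fun p => PySem.Int.toStr p.1 ++ " " ++ p.2) := by
  by_cases h1 : n1 > 0 <;> by_cases h2 : n2 > 0 <;> by_cases h3 : n3 > 0 <;> by_cases h4 : n4 > 0 <;>
    simp [List.foldl, List.filter, h1, h2, h3, h4]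

theorem pv_assemble (intent C O : String) (th : List String) :
    (if ((if th ≠ [] then (if intent ≠ "" then [] ++ ["Planned: " ++ intent] else []) ++ [C]
          else if intent ≠ "" then [] ++ ["Planned: " ++ intent] else []) ++ [O]) ≠ [] then
       PySem.Str.join " | "
         ((if th ≠ [] then (if intent ≠ "" then [] ++ ["Planned: " ++ intent] else []) ++ [C]
           else if intent ≠ "" then [] ++ ["Planned: " ++ intent] else []) ++ [O])
     else "Session activity recorded.")
    = PySem.Str.join " | "
        ((if intent ≠ "" then ["Planned: " ++ intent] else []) ++ ((if th ≠ [] then [C] else []) ++ [O])) := by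
  by_cases hi : intent = "" <;> by_cases hth : th = [] <;> simp [hi, hth]

-- ===== VERDICT (by name: the statement is the Claim_ definition above) =====
theorem generate_session_summary_spec : Claim_equal_generate_session_summary := by
  intro intent commits _ _
  unfold Spec_generate_session_summary
  cases commits with
  | nil => rfl
  | cons c0 tl =>
    have h1 : (((c0 :: tl).map pvMsgA).map (fun m => if PySem.Str.isIn "memory" (PySem.Str.lower m) then (1:Int) else 0)).sum = ((c0 :: tl).map pvCntMem).sum := by
      rw [List.map_map]; rfl
    have h2 : (((c0 :: tl).map pvMsgA).map (fun m => if PySem.Str.isIn "session" (PySem.Str.lower m) then (1:Int) else 0)).sum = ((c0 :: tl).map pvCntSess).sum := by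
      rw [List.map_map]; rfl
    have h3 : (((c0 :: tl).map pvMsgA).map (fun m => if ["doc","readme","update"].any (fun kw => PySem.Str.isIn kw (PySem.Str.lower m)) then (1:Int) else 0)).sum = ((c0 :: tl).map pvCntDoc).sum := by
      rw [List.map_map]; rfl
    have h4 : (((c0 :: tl).map pvMsgA).map (fun m => if ["fix","bug"].any (fun kw => PySem.Str.isIn kw (PySem.Str.lower m)) then (1:Int) else 0)).sum = ((c0 :: tl).map pvCntFix).sum := by
      rw [List.map_map]; rfl
    unfold generate_session_summary generate_session_summary_alt summarize_commits pvScan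
    rw [pv_scan_fold]
    simp only [List.cons_ne_nil, if_false, List.length_cons,
      PySem.List.pyGetD_zero_cons, zero_add, h1, h2, h3, h4]
    rw [pv_parts_eq]
    have hgt : tl.length + 1 > 0 := Nat.succ_pos _
    simp only [if_pos hgt]
    rw [pv_assemble, List.append_assoc]
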